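-- pv_equiv track=rewrite | github.com/AntoineBonnet04/braille | english_braille.py | transfer_quotes_parentheses
-- ===== SOURCE A (Python) =====
-- def convert_quotes(text):
--     '''(str) -> str
--     Convert the straight quotation mark into open/close quotations.
--     >>> convert_quotes('"Hello"')
--     '“Hello”'
--     >>> convert_quotes('"Hi" and "Hello"')
--     '“Hi” and “Hello”'
--     >>> convert_quotes('"')
--     '“'
--     >>> convert_quotes('"""')
--     '“”“'
--     >>> convert_quotes('" "o" "i" "')
--     '“ ”o“ ”i“ ”'
--     '''
--
--     if text.count('"') == 0:
--             return text
--
--     quote_count = 0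
--     translated_word = ""
--
--     for i in range(0, len(text)):
--
--         if text[i] != '"': #if given character is not a quotation mark
--             translated_word += text[i] #adds letter unchanged
--
--         elif text[i] == '"' and (quote_count+2)%2 == 0: #if even number of quot. mark
--             translated_word += '“' #adds open quot. mark
--             quote_count += 1
--
--         elif text[i] == '"' and (quote_count+1)%2 == 0: #if odd number of quot.mark
--             translated_word += '”' #adds closed quot. mark
--             quote_count += 1
--
--     return translated_word #reconstructed word is returned
--
-- def transfer_quotes_parentheses(text):
--     '''(str) -> (str)
--     Before translating to French Braille, exchange corresponding terms such that
--     the French Braille conversion yields an English braille conversion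
--     knowing that '(' and ')'in E.B. are equivalent to '“' and '”' in F.B.
--     >>> transfer_quotes_parentheses('(and)')
--     '“and”'
--     >>> transfer_quotes_parentheses('My (first) name is "Antoine"')
--     'My “first” name is (Antoine)'
--     >>> transfer_quotes_parentheses('("J. K. Rowling")')
--     '“(J. K. Rowling)”'
--     >>> transfer_quotes_parentheses('() "" ("")')
--     '“” () “()”'
--     >>> transfer_quotes_parentheses('(hi)')
--     '“hi”'
--     '''
--
--     text = convert_quotes(text) #Converts quotes in text
--     new_text = '' #initializes a new text
--     for i in range(0, len(text)):
--         if text[i] == '“' or text[i] == '?':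
--             new_text += '('
--
--         elif text[i] == '”':
--             new_text += ')'
--
--         elif text[i] == '(':
--             new_text +=  '“'
--
--         elif text[i] == ')':
--             new_text += '”'
--         else:
--             new_text += text[i]
--
--     return new_text
-- ===== SOURCE B (Python) =====
-- def _emit(ch, qc):
--     if ch == '"':
--         return '(' if qc % 2 == 0 else ')'
--     if ch == '(':
--         return '“'
--     if ch == ')':
--         return '”'
--     if ch == '“' or ch == '?':
--         return '('
--     if ch == '”':
--         return ')'
--     return ch
--
-- def transfer_quotes_parentheses(text):
--     out = []
--     quote_count = 0
--     for ch in text: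
--         out.append(_emit(ch, quote_count))
--         if ch == '"':
--             quote_count += 1
--     return ''.join(out)
-- ===== Notes on version B (the rewrite author's own statement) =====
-- stated objective: simpler
-- what changed: A converts straight quotes in one pass (building an intermediate string) and then swaps quote/parenthesis characters in a second pass; B fuses both into a single pass that maps each character directly via a small helper while maintaining the quote parity counter, with no intermediate string.
import Mathlib
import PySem

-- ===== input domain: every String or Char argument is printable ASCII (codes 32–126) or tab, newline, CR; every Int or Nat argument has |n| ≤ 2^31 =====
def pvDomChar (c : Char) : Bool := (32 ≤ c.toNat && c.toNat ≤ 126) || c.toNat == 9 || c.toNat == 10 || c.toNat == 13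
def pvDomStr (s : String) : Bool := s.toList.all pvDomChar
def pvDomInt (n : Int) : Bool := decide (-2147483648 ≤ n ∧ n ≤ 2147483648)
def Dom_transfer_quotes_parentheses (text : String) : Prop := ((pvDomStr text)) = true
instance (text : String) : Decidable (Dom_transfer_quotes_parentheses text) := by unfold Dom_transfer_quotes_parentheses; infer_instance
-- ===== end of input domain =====

-- B fuses A's convert-then-swap two-pass structure into one pass with a per-character helper; simpler, same cost.

-- ===== PORT A =====
-- convert_quotes's loop: quote_count and the accumulated translated_word are the loop state
def pvConvLoop : List Char → Int → List Char → List Char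
  | [], _, acc => acc
  | c :: rest, q, acc =>
    if c ≠ '"' then pvConvLoop rest q (acc ++ [c])
    else if PySem.Int.mod (q + 2) 2 = 0 then pvConvLoop rest (q + 1) (acc ++ ['“'])
    else if PySem.Int.mod (q + 1) 2 = 0 then pvConvLoop rest (q + 1) (acc ++ ['”'])
    else pvConvLoop rest q acc  -- no branch fires: Python's for-body adds nothing

def pvConvertQuotes (text : String) : String :=
  if PySem.Str.count text "\"" = 0 then text
  else String.ofList (pvConvLoop text.toList 0 [])

-- the body of transfer_quotes_parentheses's for-loop (each branch appends to new_text)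
def pvSwapStep (acc : List Char) (c : Char) : List Char :=
  if c = '“' ∨ c = '?' then acc ++ ['(']
  else if c = '”' then acc ++ [')']
  else if c = '(' then acc ++ ['“']
  else if c = ')' then acc ++ ['”']
  else acc ++ [c]

def transfer_quotes_parentheses (text : String) : String :=
  String.ofList ((pvConvertQuotes text).toList.foldl pvSwapStep [])

-- ===== PORT B =====
-- Source B's _emit helper
def pvEmit (c : Char) (q : Nat) : Char :=
  if c = '"' then (if q % 2 = 0 then '(' else ')')
  else if c = '(' then '“'
  else if c = ')' then '”'
  else if c = '“' ∨ c = '?' then '('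
  else if c = '”' then ')'
  else c

-- Source B's single loop: emit one char per input char, bump quote_count on '"'
def pvAltLoop : List Char → Nat → List Char
  | [], _ => []
  | c :: rest, q => pvEmit c q :: pvAltLoop rest (if c = '"' then q + 1 else q)

def transfer_quotes_parentheses_alt (text : String) : String :=
  String.ofList (pvAltLoop text.toList 0)

-- ===== PRECONDITION & SPEC =====
def Spec_transfer_quotes_parentheses (text : String) (out : String) : Prop := out = transfer_quotes_parentheses_alt text
instance (text : String) (out : String) : Decidable (Spec_transfer_quotes_parentheses text out) := by unfold Spec_transfer_quotes_parentheses; infer_instance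

-- ===== CLAIM (what is proved, stated in full; the proofs are below) =====
def Claim_equal_transfer_quotes_parentheses : Prop := ∀ (text : String), Dom_transfer_quotes_parentheses text → Spec_transfer_quotes_parentheses text (transfer_quotes_parentheses text)

-- ===== LEMMAS AND PROOFS =====

-- A's second pass maps each character through this function
def pvSwapChar (c : Char) : Char :=
  if c = '“' ∨ c = '?' then '('
  else if c = '”' then ')'
  else if c = '(' then '“'
  else if c = ')' then '”'
  else c

theorem pvSwapStep_eq (acc : List Char) (c : Char) :
    pvSwapStep acc c = acc ++ [pvSwapChar c] := by
  unfold pvSwapStep pvSwapChar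
  split_ifs <;> rfl

theorem pvSwap_foldl (l : List Char) :
    l.foldl pvSwapStep [] = l.map pvSwapChar := by
  rw [PySem.List.foldl_congr_mem l pvSwapStep (fun acc x => acc ++ [pvSwapChar x]) []
       (fun acc x _ => pvSwapStep_eq acc x),
     PySem.List.foldl_append_singleton_eq_map]
  rfl

theorem pvEmit_of_ne (c : Char) (q : Nat) (h : c ≠ '"') : pvEmit c q = pvSwapChar c := by
  unfold pvEmit pvSwapChar
  split_ifs <;> first | rfl | (exfalso; subst_vars; simp_all)

theorem pvConvLoop_acc (l : List Char) (q : Int) (acc : List Char) :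
    pvConvLoop l q acc = acc ++ pvConvLoop l q [] := by
  induction l generalizing q acc with
  | nil => simp [pvConvLoop]
  | cons c rest ih =>
    by_cases hc : c = '"'
    · subst hc
      by_cases h2 : PySem.Int.mod (q + 2) 2 = 0
      · simp only [pvConvLoop, ne_eq, not_true_eq_false, if_false, if_pos h2, List.nil_append]
        rw [ih (q + 1) (acc ++ ['“']), ih (q + 1) ['“']]
        simp
      · by_cases h1 : PySem.Int.mod (q + 1) 2 = 0
        · simp only [pvConvLoop, ne_eq, not_true_eq_false, if_false, if_neg h2, if_pos h1, List.nil_append]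
          rw [ih (q + 1) (acc ++ ['”']), ih (q + 1) ['”']]
          simp
        · simp only [pvConvLoop, ne_eq, not_true_eq_false, if_false, if_neg h2, if_neg h1]
          exact ih q acc
    · simp only [pvConvLoop, ne_eq, hc, not_false_eq_true, if_true, List.nil_append]
      rw [ih q (acc ++ [c]), ih q [c]]
      simp

theorem pvMod_add_two (n : Nat) :
    (PySem.Int.mod ((n : Int) + 2) 2 = 0) ↔ n % 2 = 0 := by
  have h : ((n : Int) + 2) = ((n + 2 : Nat) : Int) := by push_cast; ring
  have h2 : PySem.Int.mod ((n + 2 : Nat) : Int) ((2 : Nat) : Int) = (((n + 2) % 2 : Nat) : Int) :=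
    PySem.Int.mod_natCast (n + 2) 2
  rw [h, show (2 : Int) = ((2 : Nat) : Int) by norm_num, h2]
  omega

theorem pvMod_add_one (n : Nat) :
    (PySem.Int.mod ((n : Int) + 1) 2 = 0) ↔ n % 2 = 1 := by
  have h : ((n : Int) + 1) = ((n + 1 : Nat) : Int) := by push_cast; ring
  have h2 : PySem.Int.mod ((n + 1 : Nat) : Int) ((2 : Nat) : Int) = (((n + 1) % 2 : Nat) : Int) :=
    PySem.Int.mod_natCast (n + 1) 2
  rw [h, show (2 : Int) = ((2 : Nat) : Int) by norm_num, h2]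
  omega

-- main bridge: swapping A's converted text = B's fused loop
theorem pvMain (l : List Char) (n : Nat) :
    (pvConvLoop l (n : Int) []).map pvSwapChar = pvAltLoop l n := by
  induction l generalizing n with
  | nil => simp [pvConvLoop, pvAltLoop]
  | cons c rest ih =>
    by_cases hc : c = '"'
    · subst hc
      by_cases hev : n % 2 = 0
      · have h2 : PySem.Int.mod ((n : Int) + 2) 2 = 0 := (pvMod_add_two n).mpr hev
        simp only [pvConvLoop, ne_eq, not_true_eq_false, if_false, if_pos h2, List.nil_append]
        rw [pvConvLoop_acc, show ((n : Int) + 1) = (((n + 1 : Nat)) : Int) by push_cast; ring]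
        simp only [List.map_append, ih (n + 1)]
        simp [pvAltLoop, pvEmit, hev, pvSwapChar]
      · have h2 : ¬ PySem.Int.mod ((n : Int) + 2) 2 = 0 := fun h => hev ((pvMod_add_two n).mp h)
        have h1 : PySem.Int.mod ((n : Int) + 1) 2 = 0 := (pvMod_add_one n).mpr (by omega)
        simp only [pvConvLoop, ne_eq, not_true_eq_false, if_false, if_neg h2, if_pos h1, List.nil_append]
        rw [pvConvLoop_acc, show ((n : Int) + 1) = (((n + 1 : Nat)) : Int) by push_cast; ring]
        simp only [List.map_append, ih (n + 1)]
        simp [pvAltLoop, pvEmit, hev, pvSwapChar]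
    · simp only [pvConvLoop, ne_eq, hc, not_false_eq_true, if_true, List.nil_append]
      rw [pvConvLoop_acc]
      simp [pvAltLoop, pvEmit_of_ne c n hc, ih, hc]

-- Chars.count for the single-character needle '"' is plain character counting
theorem pvCountGo_quote (fuel : Nat) (l : List Char) (acc : Nat) :
    PySem.Chars.count.go ['"'] fuel l acc = acc + ((l.take fuel).count '"') := by
  induction fuel generalizing l acc with
  | zero => simp [PySem.Chars.count.go]
  | succ f ih =>
    cases l with
    | nil => simp [PySem.Chars.count.go]
    | cons c rest =>
      by_cases hc : c = '"'
      · subst hc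
        rw [PySem.Chars.count.go]
        rw [if_pos (by simp [List.isPrefixOf])]
        simp only [List.length_cons, List.length_nil, Nat.zero_add, List.drop_succ_cons,
          List.drop_zero]
        rw [ih]
        simp
        omega
      · rw [PySem.Chars.count.go]
        have hp : ¬ (List.isPrefixOf ['"'] (c :: rest) = true) := by
          simp [List.isPrefixOf_cons₂]
          exact fun h => hc h.symm
        rw [if_neg hp, ih]
        simp [hc]

theorem pvCount_quote (l : List Char) :
    PySem.Chars.count l ['"'] = l.count '"' := by
  unfold PySem.Chars.count
  simp [pvCountGo_quote]

theorem pvNoQuote (l : List Char) (n : Nat) (h : '"' ∉ l) :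
    l.map pvSwapChar = pvAltLoop l n := by
  induction l generalizing n with
  | nil => rfl
  | cons c rest ih =>
    have hc : c ≠ '"' := fun hh => h (hh ▸ List.mem_cons_self)
    have hr : '"' ∉ rest := fun hh => h (List.mem_cons_of_mem _ hh)
    simp [pvAltLoop, pvEmit_of_ne c n hc, hc, ih n hr]

-- ===== VERDICT (by name: the statement is the Claim_ definition above) =====
theorem transfer_quotes_parentheses_spec : Claim_equal_transfer_quotes_parentheses := by
  intro text _
  unfold Spec_transfer_quotes_parentheses
  unfold transfer_quotes_parentheses transfer_quotes_parentheses_alt pvConvertQuotes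
  by_cases h : PySem.Str.count text "\"" = 0
  · rw [if_pos h, pvSwap_foldl]
    have hq : '"' ∉ text.toList := by
      rw [PySem.Str.count_eq, show ("\"" : String).toList = ['"'] from rfl,
        pvCount_quote] at h
      exact List.count_eq_zero.mp h
    exact congrArg String.ofList (pvNoQuote text.toList 0 hq)
  · rw [if_neg h]
    rw [String.toList_ofList, pvSwap_foldl]
    exact congrArg String.ofList (pvMain text.toList 0)
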